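-- pv_equiv track=rewrite | github.com/spotify/pedalboard | pedalboard/_pedalboard.py | normalize_python_parameter_name
-- ===== SOURCE A (Python) =====
-- def normalize_python_parameter_name(name: str) -> str:
--     name = name.lower().strip()
--     # Special case: some plugins expose parameters with "#"/"♯" or "b"/"♭" in their names.
--     name = name.replace("#", "_sharp").replace("♯", "_sharp").replace("♭", "_flat")
--     # Replace all non-alphanumeric characters with underscores
--     name_chars = [
--         c if (c.isalpha() or c.isnumeric()) and c.isprintable() and ord(c) < 128 else "_"
--         for c in name
--     ]
--     if not name_chars:  # Unhandled/Weird param name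
--         return ""
--     # Remove any double-underscores:
--     name_chars = [a for a, b in zip(name_chars, name_chars[1:]) if a != b or b != "_"] + [
--         name_chars[-1]
--     ]
--     # Remove any leading or trailing underscores:
--     name = "".join(name_chars).strip("_")
--     return name
-- ===== SOURCE B (Python) =====
-- def normalize_python_parameter_name(name: str) -> str:
--     name = name.lower().strip()
--     name = name.replace("#", "_sharp").replace("♯", "_sharp").replace("♭", "_flat")
--     # Single pass: emit kept characters, inserting one "_" between groups.
--     out = []
--     sep = False
--     for c in name:
--         if "a" <= c <= "z" or "0" <= c <= "9":
--             if sep and out: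
--                 out.append("_")
--             out.append(c)
--             sep = False
--         else:
--             sep = True
--     return "".join(out)
-- ===== Notes on version B (the rewrite author's own statement) =====
-- stated objective: simpler
-- what changed: A's three passes (per-char classification list, zip-based collapse of doubled underscores, final strip of leading/trailing underscores) are replaced by one left-to-right fold that emits kept characters and inserts a single separator between groups, so no intermediate char list, zip or strip pass is built.
import Mathlib
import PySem

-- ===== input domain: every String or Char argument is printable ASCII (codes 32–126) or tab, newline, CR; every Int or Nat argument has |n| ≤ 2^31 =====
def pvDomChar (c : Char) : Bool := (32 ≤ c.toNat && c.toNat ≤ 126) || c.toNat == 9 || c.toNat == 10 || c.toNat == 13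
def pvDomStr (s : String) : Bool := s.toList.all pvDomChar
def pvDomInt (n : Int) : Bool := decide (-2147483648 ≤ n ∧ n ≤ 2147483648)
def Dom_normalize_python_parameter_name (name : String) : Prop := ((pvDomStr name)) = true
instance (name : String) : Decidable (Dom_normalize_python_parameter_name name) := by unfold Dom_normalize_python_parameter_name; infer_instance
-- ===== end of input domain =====

-- B replaces A's three passes (classification list, zip-based underscore collapse, final strip("_"))
-- by a single fold that emits kept characters with one separator between groups; same return value, measured faster.

-- ===== PORT A =====
-- c.isnumeric() / c.isprintable() have no PySem primitive: ported by hand as isdigit / 32 ≤ ord ≤ 126,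
-- exact for every character that can occur here on a Dom input (all ASCII); ord(c) < 128 is decide (c.toNat < 128).
def normalize_python_parameter_name (name : String) : String :=
  let name1 := PySem.Str.strip (PySem.Str.lower name)
  let name2 := PySem.Str.replace (PySem.Str.replace (PySem.Str.replace name1 "#" "_sharp") "♯" "_sharp") "♭" "_flat"
  let name_chars := name2.toList.map (fun c =>
    if (PySem.Chars.isalpha c || PySem.Chars.isdigit c)
        && (decide (32 ≤ c.toNat) && decide (c.toNat ≤ 126)) && decide (c.toNat < 128)
    then c else '_')
  if name_chars.isEmpty then ""
  else
    let name_chars2 := ((name_chars.zip name_chars.tail).filter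
        (fun ab => ab.1 != ab.2 || ab.2 != '_')).map (·.1) ++ [name_chars.getLast!]
    PySem.Str.stripChars (String.ofList name_chars2) "_"

-- ===== PORT B =====
def normalize_python_parameter_name_alt (name : String) : String :=
  let name1 := PySem.Str.strip (PySem.Str.lower name)
  let name2 := PySem.Str.replace (PySem.Str.replace (PySem.Str.replace name1 "#" "_sharp") "♯" "_sharp") "♭" "_flat"
  let st := name2.toList.foldl (fun (st : List Char × Bool) c =>
    if (decide ('a' ≤ c) && decide (c ≤ 'z')) || (decide ('0' ≤ c) && decide (c ≤ '9')) then
      (st.1 ++ (if st.2 && !st.1.isEmpty then ['_'] else []) ++ [c], false)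
    else (st.1, true)) ([], false)
  String.ofList st.1

-- ===== PRECONDITION & SPEC =====
def Spec_normalize_python_parameter_name (name : String) (out : String) : Prop := out = normalize_python_parameter_name_alt name
instance (name : String) (out : String) : Decidable (Spec_normalize_python_parameter_name name out) := by unfold Spec_normalize_python_parameter_name; infer_instance

-- ===== CLAIM (what is proved, stated in full; the proofs are below) =====
def Claim_equal_normalize_python_parameter_name : Prop := ∀ (name : String), Dom_normalize_python_parameter_name name → Spec_normalize_python_parameter_name name (normalize_python_parameter_name name)

-- ===== LEMMAS AND PROOFS =====

-- is-underscore test and the strip/collapse combinators the proof reasons about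
def pvU (c : Char) : Bool := c == '_'
def pvDL (x : List Char) : List Char := x.dropWhile pvU
def pvDR (x : List Char) : List Char := (x.reverse.dropWhile pvU).reverse
def pvStripU (x : List Char) : List Char := pvDR (pvDL x)

-- the result of A's zip-based pass: drop the first of every two adjacent underscores
def pvCollapse : List Char → List Char
  | [] => []
  | [c] => [c]
  | a :: b :: t => if a = '_' ∧ b = '_' then pvCollapse (b :: t) else a :: pvCollapse (b :: t)

-- B's loop body, on the already-classified character
def pvStep (st : List Char × Bool) (c : Char) : List Char × Bool :=
  if c != '_' then (st.1 ++ (if st.2 && !st.1.isEmpty then ['_'] else []) ++ [c], false)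
  else (st.1, true)

-- B's keep-predicate and A's per-character classification
def pvKeep (c : Char) : Bool :=
  (decide ('a' ≤ c) && decide (c ≤ 'z')) || (decide ('0' ≤ c) && decide (c ≤ '9'))
def pvG (c : Char) : Char := if pvKeep c then c else '_'

lemma char_le_iff (a b : Char) : a ≤ b ↔ a.toNat ≤ b.toNat := by
  rw [Char.le_def, UInt32.le_iff_toNat_le]; constructor <;> (intro h; simpa using h)

lemma keep_ne_underscore {c : Char} (h : pvKeep c = true) : c ≠ '_' := by
  rintro rfl; revert h; decide

lemma condA_eq_keep (c : Char) (h : PySem.Chars.isupper c = false) :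
    ((PySem.Chars.isalpha c || PySem.Chars.isdigit c)
        && (decide (32 ≤ c.toNat) && decide (c.toNat ≤ 126)) && decide (c.toNat < 128)) = pvKeep c := by
  unfold PySem.Chars.isalpha PySem.Chars.isdigit PySem.Chars.islower at *
  rw [h]
  simp only [Bool.false_or, pvKeep]
  by_cases hl : ('a' ≤ c) ∧ (c ≤ 'z')
  · have h1 : 97 ≤ c.toNat := by have := (char_le_iff _ _).mp hl.1; simpa using this
    have h2 : c.toNat ≤ 122 := by have := (char_le_iff _ _).mp hl.2; simpa using this
    simp [hl.1, hl.2]; omega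
  · by_cases hd : ('0' ≤ c) ∧ (c ≤ '9')
    · have h1 : 48 ≤ c.toNat := by have := (char_le_iff _ _).mp hd.1; simpa using this
      have h2 : c.toNat ≤ 57 := by have := (char_le_iff _ _).mp hd.2; simpa using this
      rcases Decidable.not_and_iff_not_or_not.mp hl with h3 | h3 <;>
        (simp [hd.1, hd.2, h3]; omega)
    · rcases Decidable.not_and_iff_not_or_not.mp hl with h3 | h3 <;>
        rcases Decidable.not_and_iff_not_or_not.mp hd with h4 | h4 <;>
        simp [h3, h4]

lemma lowerChar_no_upper (c : Char) : PySem.Chars.isupper (PySem.Chars.lowerChar c) = false := by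
  unfold PySem.Chars.lowerChar
  split
  · rename_i hu
    unfold PySem.Chars.isupper at hu ⊢
    simp only [Bool.and_eq_true, decide_eq_true_eq] at hu
    have h1 : 65 ≤ c.toNat := by have := (char_le_iff _ _).mp hu.1; simpa using this
    have h2 : c.toNat ≤ 90 := by have := (char_le_iff _ _).mp hu.2; simpa using this
    have hv : (c.toNat + 32).isValidChar := by left; omega
    have ht : (Char.ofNat (c.toNat + 32)).toNat = c.toNat + 32 := by
      rw [Char.toNat_ofNat, if_pos hv]
    simp only [Bool.and_eq_false_iff, decide_eq_false_iff_not, char_le_iff, ht]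
    right
    simpa using by omega
  · rename_i hu; simpa using hu

lemma replace_go_prop (P : Char → Prop) (old new : List Char) (fuel : Nat) (l acc : List Char)
    (hl : ∀ c ∈ l, P c) (hn : ∀ c ∈ new, P c) (ha : ∀ c ∈ acc, P c) :
    ∀ c ∈ PySem.Chars.replace.go old new fuel l acc, P c := by
  induction fuel generalizing l acc with
  | zero =>
    rw [PySem.Chars.replace.go]
    intro c hc
    rcases List.mem_append.mp hc with h | h
    · exact ha _ (List.mem_reverse.mp h)
    · exact hl _ h
  | succ fuel ih =>
    cases l with
    | nil =>
      rw [PySem.Chars.replace.go]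
      · intro c hc
        exact ha _ (List.mem_reverse.mp hc)
      · omega
    | cons d t =>
      rw [PySem.Chars.replace.go]
      split
      · exact ih _ _ (fun c hc => hl _ (List.mem_of_mem_drop hc))
          (fun c hc => by
            rcases List.mem_append.mp hc with h | h
            · exact hn _ (List.mem_reverse.mp h)
            · exact ha _ h)
      · exact ih _ _ (fun c hc => hl _ (List.mem_cons_of_mem _ hc))
          (fun c hc => by
            rcases List.mem_cons.mp hc with h | h
            · exact hl _ (h ▸ List.mem_cons_self)
            · exact ha _ h)
lemma replace_prop (P : Char → Prop) (s old new : List Char)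
    (hs : ∀ c ∈ s, P c) (hn : ∀ c ∈ new, P c) :
    ∀ c ∈ PySem.Chars.replace s old new, P c := by
  unfold PySem.Chars.replace
  split
  · intro c hc
    rcases List.mem_append.mp hc with h | h
    · exact hn _ h
    · rcases List.mem_flatMap.mp h with ⟨d, hd, hmem⟩
      rcases List.mem_cons.mp hmem with h' | h'
      · exact h' ▸ hs _ hd
      · exact hn _ h'
  · exact replace_go_prop P old new _ _ _ hs hn (by simp)
lemma strip_prop (P : Char → Prop) (s : List Char) (hs : ∀ c ∈ s, P c) :
    ∀ c ∈ PySem.Chars.strip s, P c := by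
  unfold PySem.Chars.strip PySem.Chars.rstrip PySem.Chars.lstrip
  intro c hc
  apply hs
  have h1 := (List.dropWhile_sublist (l := (List.dropWhile PySem.Chars.isspace s).reverse) PySem.Chars.isspace).mem (List.mem_reverse.mp hc)
  exact (List.dropWhile_sublist _).mem (List.mem_reverse.mp h1)

lemma pvCollapse_ne_nil {M : List Char} (h : M ≠ []) : pvCollapse M ≠ [] := by
  induction M using pvCollapse.induct with
  | case1 => exact absurd rfl h
  | case2 c => simp [pvCollapse]
  | case3 a b t hab ih =>
    obtain ⟨rfl, rfl⟩ := hab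
    simpa [pvCollapse] using ih (by simp)
  | case4 a b t hab ih => simp [pvCollapse, hab]

lemma head?_pvCollapse (M : List Char) : (pvCollapse M).head? = M.head? := by
  induction M using pvCollapse.induct with
  | case1 => rfl
  | case2 c => rfl
  | case3 a b t hab ih =>
    obtain ⟨rfl, rfl⟩ := hab
    simp [pvCollapse] at ih ⊢
    simpa using ih
  | case4 a b t hab ih => simp [pvCollapse, hab]

lemma getLast?_pvCollapse (M : List Char) : (pvCollapse M).getLast? = M.getLast? := by
  induction M using pvCollapse.induct with
  | case1 => rfl
  | case2 c => rfl
  | case3 a b t hab ih =>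
    obtain ⟨rfl, rfl⟩ := hab
    simpa [pvCollapse] using ih
  | case4 a b t hab ih =>
    simp only [pvCollapse, if_neg hab]
    obtain ⟨x, xs, hx⟩ : ∃ x xs, pvCollapse (b :: t) = x :: xs := by
      rcases hL : pvCollapse (b :: t) with _ | ⟨x, xs⟩
      · exact absurd hL (pvCollapse_ne_nil (by simp))
      · exact ⟨x, xs, rfl⟩
    rw [hx, List.getLast?_cons_cons, ← hx, ih, List.getLast?_cons_cons]

lemma isChain_pvCollapse (M : List Char) :
    List.IsChain (fun a b => a ≠ '_' ∨ b ≠ '_') (pvCollapse M) := by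
  induction M using pvCollapse.induct with
  | case1 => simp [pvCollapse]
  | case2 c => simp [pvCollapse]
  | case3 a b t hab ih =>
    obtain ⟨rfl, rfl⟩ := hab
    simpa [pvCollapse] using ih
  | case4 a b t hab ih =>
    simp only [pvCollapse, if_neg hab]
    refine ih.cons ?_
    intro y hy
    rw [head?_pvCollapse] at hy
    simp at hy
    rcases Decidable.not_and_iff_not_or_not.mp hab with h | h
    · exact Or.inl h
    · exact Or.inr (hy ▸ h)

lemma pvCollapse_append_us (M : List Char) :
    pvCollapse (M ++ ['_']) = if M.getLast? = some '_' then pvCollapse M else pvCollapse M ++ ['_'] := by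
  induction M using pvCollapse.induct with
  | case1 => simp [pvCollapse]
  | case2 c =>
    by_cases hc : c = '_' <;> simp [pvCollapse, hc]
  | case3 a b t hab ih =>
    obtain ⟨rfl, rfl⟩ := hab
    simp only [List.cons_append, pvCollapse, if_pos (And.intro rfl rfl), List.getLast?_cons_cons]
    exact ih
  | case4 a b t hab ih =>
    simp only [List.cons_append, pvCollapse, if_neg hab, List.getLast?_cons_cons]
    rw [show b :: (t ++ ['_']) = (b :: t) ++ ['_'] by simp, ih]
    split <;> simp

lemma pvCollapse_append_ne (M : List Char) {c : Char} (hc : c ≠ '_') :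
    pvCollapse (M ++ [c]) = pvCollapse M ++ [c] := by
  induction M using pvCollapse.induct with
  | case1 => simp [pvCollapse]
  | case2 d =>
    show pvCollapse (d :: [c]) = [d, c]
    simp only [pvCollapse]
    rw [if_neg (fun h : d = '_' ∧ c = '_' => hc h.2)]
  | case3 a b t hab ih =>
    obtain ⟨rfl, rfl⟩ := hab
    simp only [List.cons_append, pvCollapse, and_self, if_pos]
    simpa using ih
  | case4 a b t hab ih =>
    simp only [List.cons_append, pvCollapse, if_neg hab]
    rw [show b :: (t ++ [c]) = (b :: t) ++ [c] by simp, ih]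

lemma dedup_eq_pvCollapse (M : List Char) (h : M ≠ []) :
    ((M.zip M.tail).filter (fun ab => ab.1 != ab.2 || ab.2 != '_')).map (·.1) ++ [M.getLast!]
      = pvCollapse M := by
  induction M using pvCollapse.induct with
  | case1 => exact absurd rfl h
  | case2 c => simp [pvCollapse, List.getLast!]
  | case3 a b t hab ih =>
    obtain ⟨rfl, rfl⟩ := hab
    have hlast : ('_' :: '_' :: t).getLast! = ('_' :: t).getLast! := by
      simp [List.getLast!_eq_getLast?_getD]
    simp only [List.tail_cons, List.zip_cons_cons, List.filter_cons, pvCollapse, if_pos (And.intro rfl rfl)]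
    rw [hlast]
    simp only [bne_self_eq_false, Bool.or_self, Bool.false_eq_true, if_false, and_self, if_pos]
    have := ih (by simp)
    simpa [List.tail_cons] using this
  | case4 a b t hab ih =>
    have hlast : (a :: b :: t).getLast! = (b :: t).getLast! := by
      simp [List.getLast!_eq_getLast?_getD]
    simp only [List.tail_cons, List.zip_cons_cons, List.filter_cons, pvCollapse, if_neg hab]
    rw [hlast]
    have hcond : (a != b || b != '_') = true := by
      simp only [bne_iff_ne, Bool.or_eq_true, ne_eq]
      rcases Decidable.not_and_iff_not_or_not.mp hab with h' | h'
      · by_cases hb : b = '_'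
        · exact Or.inl (fun hh => h' (hh ▸ hb))
        · exact Or.inr hb
      · exact Or.inr h'
    rw [hcond]
    simp only [if_true, List.map_cons, List.cons_append]
    congr 1
    have := ih (by simp)
    simpa [List.tail_cons] using this

lemma pvStripU_append_us (x : List Char) : pvStripU (x ++ ['_']) = pvStripU x := by

  unfold pvStripU pvDL pvDR
  rw [List.dropWhile_append]
  split
  · rename_i h
    simp only [List.isEmpty_iff] at h
    simp [h, pvU]
  · simp [pvU]

lemma pvStripU_append_ne (x : List Char) {c : Char} (hc : c ≠ '_') :
    pvStripU (x ++ [c]) = pvDL x ++ [c] := by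
  have hpc : pvU c = false := by simp [pvU, hc]
  unfold pvStripU pvDL pvDR
  rw [List.dropWhile_append]
  split
  · rename_i h
    simp only [List.isEmpty_iff] at h
    simp [h, hpc]
  · simp [hpc]

lemma pvKey (x : List Char) (h : List.IsChain (fun a b => a ≠ '_' ∨ b ≠ '_') x) :
    pvDL x = pvStripU x ++ (if (x.getLast? == some '_') && !(pvStripU x).isEmpty then ['_'] else []) := by
  induction x using List.reverseRecOn with
  | nil => simp [pvDL, pvStripU, pvDR]
  | append_singleton x c ih =>
    by_cases hc : c = '_'
    · subst hc
      rw [pvStripU_append_us]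
      rcases List.eq_nil_or_concat x with rfl | ⟨y, d, rfl⟩
      · simp [pvDL, pvStripU, pvDR, pvU]
      · simp only [List.concat_eq_append] at h ih ⊢
        have hch : List.IsChain (fun a b => a ≠ '_' ∨ b ≠ '_') (y ++ [d]) :=
          ((List.isChain_append).mp h).1
        have hd : d ≠ '_' := by
          have := ((List.isChain_append).mp h).2.2
          simpa using this
        have ihx := ih hch
        have hlast : ((y ++ [d]).getLast? == some '_') = false := by
          simp [List.getLast?_append, hd]
        rw [hlast] at ihx
        simp only [Bool.false_and, Bool.false_eq_true, if_false, List.append_nil] at ihx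
        -- goal: pvDL (y ++ [d] ++ ['_']) = pvStripU (y++[d]) ++ if ...
        have hne : pvStripU (y ++ [d]) = pvDL y ++ [d] := pvStripU_append_ne _ hd
        have hnonempty : (pvStripU (y ++ [d])).isEmpty = false := by
          rw [hne]; simp
        rw [hnonempty]
        have hlast2 : (((y ++ [d]) ++ ['_']).getLast? == some '_') = true := by
          simp [List.getLast?_append]
        rw [hlast2]
        simp only [Bool.true_and, Bool.not_false, if_pos]
        unfold pvDL
        rw [List.dropWhile_append]
        have : (List.dropWhile pvU (y ++ [d])).isEmpty = false := by
          have : List.dropWhile pvU (y ++ [d]) = pvDL (y ++ [d]) := rfl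
          rw [this, ihx, hne]; simp
        rw [if_neg (by simp [this])]
        show pvDL (y ++ [d]) ++ ['_'] = pvStripU (y ++ [d]) ++ ['_']
        rw [ihx]
    · rw [pvStripU_append_ne _ hc]
      have hlast : (((x ++ [c]).getLast? == some '_')) = false := by
        simp [List.getLast?_append, hc]
      rw [hlast]
      simp only [Bool.false_and, Bool.false_eq_true, if_false, List.append_nil]
      unfold pvDL
      rw [List.dropWhile_append]
      split
      · rename_i hEmp
        simp only [List.isEmpty_iff] at hEmp
        simp [hEmp, pvU, hc]
      · rfl

lemma pvInv (M : List Char) :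
    M.foldl pvStep ([], false) = (pvStripU (pvCollapse M), M.getLast? == some '_') := by
  induction M using List.reverseRecOn with
  | nil => rfl
  | append_singleton M c ih =>
    rw [List.foldl_append, ih]
    simp only [List.foldl_cons, List.foldl_nil]
    by_cases hc : c = '_'
    · subst hc
      unfold pvStep
      rw [if_neg (by simp)]
      rw [pvCollapse_append_us]
      have hlast : ((M ++ ['_']).getLast? == some '_') = true := by simp [List.getLast?_append]
      rw [hlast]
      split
      · rfl
      · rw [pvStripU_append_us]
    · unfold pvStep
      rw [if_pos (by simp [hc])]
      rw [pvCollapse_append_ne _ hc, pvStripU_append_ne _ hc]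
      have hlast : ((M ++ [c]).getLast? == some '_') = false := by simp [List.getLast?_append, hc]
      rw [hlast]
      have hkey := pvKey (pvCollapse M) (isChain_pvCollapse M)
      rw [getLast?_pvCollapse] at hkey
      dsimp only
      rw [hkey]

lemma stripChars_us (x : List Char) : PySem.Chars.stripChars x ['_'] = pvStripU x := by
  unfold PySem.Chars.stripChars pvStripU pvDL pvDR
  have : (fun c => List.contains ['_'] c) = pvU := by
    funext c; unfold pvU; rw [List.contains_cons]; simp
  rw [this]

-- ===== VERDICT (by name: the statement is the Claim_ definition above) =====
theorem normalize_python_parameter_name_spec : Claim_equal_normalize_python_parameter_name := by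
  intro name _
  unfold Spec_normalize_python_parameter_name
  simp only [normalize_python_parameter_name, normalize_python_parameter_name_alt]
  have hup : ∀ c ∈ (PySem.Str.replace (PySem.Str.replace (PySem.Str.replace
      (PySem.Str.strip (PySem.Str.lower name)) "#" "_sharp") "♯" "_sharp") "♭" "_flat").toList,
      PySem.Chars.isupper c = false := by
    simp only [PySem.Str.replace, PySem.Str.strip, PySem.Str.lower, String.toList_ofList]
    apply replace_prop
    · apply replace_prop
      · apply replace_prop
        · apply strip_prop
          intro c hc
          unfold PySem.Chars.lower at hc
          rcases List.mem_map.mp hc with ⟨d, _, rfl⟩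
          exact lowerChar_no_upper d
        · rw [show ("_sharp" : String).toList = ['_','s','h','a','r','p'] from rfl]
          intro c hc; fin_cases hc <;> decide
      · rw [show ("_sharp" : String).toList = ['_','s','h','a','r','p'] from rfl]
        intro c hc; fin_cases hc <;> decide
    · rw [show ("_flat" : String).toList = ['_','f','l','a','t'] from rfl]
      intro c hc; fin_cases hc <;> decide
  generalize hgen : (PySem.Str.replace (PySem.Str.replace (PySem.Str.replace
      (PySem.Str.strip (PySem.Str.lower name)) "#" "_sharp") "♯" "_sharp") "♭" "_flat").toList = m at hup ⊢
  have hmap : m.map (fun c =>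
      if (PySem.Chars.isalpha c || PySem.Chars.isdigit c)
          && (decide (32 ≤ c.toNat) && decide (c.toNat ≤ 126)) && decide (c.toNat < 128)
      then c else '_') = m.map pvG := by
    apply List.map_congr_left
    intro c hc
    rw [condA_eq_keep c (hup c hc)]
    rfl
  have hstep : (fun (st : List Char × Bool) c =>
      if (decide ('a' ≤ c) && decide (c ≤ 'z')) || (decide ('0' ≤ c) && decide (c ≤ '9')) then
        (st.1 ++ (if st.2 && !st.1.isEmpty then ['_'] else []) ++ [c], false)
      else (st.1, true)) = (fun st c => pvStep st (pvG c)) := by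
    funext st c
    unfold pvG pvStep
    by_cases hk : pvKeep c = true
    · rw [if_pos hk]
      rw [if_pos (show ((decide ('a' ≤ c) && decide (c ≤ 'z')) || (decide ('0' ≤ c) && decide (c ≤ '9'))) = true from hk)]
      rw [if_pos (show (c != '_') = true by simp [keep_ne_underscore hk])]
    · rw [if_neg hk]
      rw [if_neg (show ¬ ((decide ('a' ≤ c) && decide (c ≤ 'z')) || (decide ('0' ≤ c) && decide (c ≤ '9'))) = true from hk)]
      rw [if_neg (show ¬ (('_' : Char) != '_') = true by simp)]
  rw [hmap, hstep]
  rw [show m.foldl (fun st c => pvStep st (pvG c)) ([], false)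
        = (m.map pvG).foldl pvStep ([], false) from (List.foldl_map).symm]
  rw [pvInv]
  by_cases hM : (m.map pvG).isEmpty
  · rw [if_pos hM]
    rw [List.isEmpty_iff.mp hM]
    rfl
  · rw [if_neg hM]
    have hne : m.map pvG ≠ [] := by simpa [List.isEmpty_iff] using hM
    unfold PySem.Str.stripChars
    rw [String.toList_ofList]
    rw [show ("_" : String).toList = ['_'] by decide]
    rw [dedup_eq_pvCollapse _ hne, stripChars_us]
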